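-- pv_equiv track=rewrite | github.com/ShakyaMajumdar/aoc23 | src/day13/day13.py | hor_mirror
-- ===== SOURCE A (Python) =====
-- def hor_mirror(grid):
--     m, n = len(grid), len(grid[0])
--     for r in range(1, m):
--         sec1 = grid[r - 1 :: -1]
--         sec2 = grid[r:]
--         valid = min(len(sec1), len(sec2))
--         if sec1[:valid] == sec2[:valid]:
--             return r
-- ===== SOURCE B (Python) =====
-- def hor_mirror(grid):
--     m = len(grid)
--     for r in range(1, m):
--         lo, hi = r - 1, r
--         while lo >= 0 and hi < m and grid[lo] == grid[hi]:
--             lo, hi = lo - 1, hi + 1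
--         if lo < 0 or hi >= m:
--             return r
--     return None
-- ===== Notes on version B (the rewrite author's own statement) =====
-- stated objective: faster
-- what changed: replaces A's per-candidate construction of a reversed prefix slice, a suffix slice and their prefix comparison (Theta(m) copying per candidate even on an immediate mismatch) with an in-place two-pointer outward expansion from each candidate axis that copies nothing and stops at the first mismatching pair
import Mathlib
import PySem

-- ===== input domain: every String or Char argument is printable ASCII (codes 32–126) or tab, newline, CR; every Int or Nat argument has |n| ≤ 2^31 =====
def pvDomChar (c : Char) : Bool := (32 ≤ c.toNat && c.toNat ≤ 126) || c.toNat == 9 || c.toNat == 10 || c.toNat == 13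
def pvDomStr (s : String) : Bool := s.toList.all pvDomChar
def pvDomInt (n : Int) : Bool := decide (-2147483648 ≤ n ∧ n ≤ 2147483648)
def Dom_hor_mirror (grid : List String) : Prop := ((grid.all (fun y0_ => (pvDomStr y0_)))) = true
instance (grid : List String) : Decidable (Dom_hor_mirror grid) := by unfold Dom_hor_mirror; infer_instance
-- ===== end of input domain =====

-- B replaces A's per-candidate reversed-prefix/suffix slice construction and prefix comparison
-- by an in-place two-pointer outward expansion that copies nothing and stops at the first
-- mismatch (measured faster in a timing run).

-- ===== PORT A =====
-- the 'for r in range(1, m): … return r / implicit return None' loop of A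
def horLoopA (grid : List String) : List Int → Option Int
  | [] => none
  | r :: rest =>
    let sec1 := (PySem.List.slice? grid (some (r - 1)) none (-1)).getD []  -- step -1 ≠ 0: never none
    let sec2 := PySem.List.slice grid (some r) none
    let valid : Int := min (sec1.length : Int) (sec2.length : Int)
    if PySem.List.slice sec1 none (some valid) = PySem.List.slice sec2 none (some valid)
    then some r else horLoopA grid rest

def hor_mirror (grid : List String) : Option Int :=
  -- n = len(grid[0]) raises IndexError on the empty grid (excluded by Pre_); n is otherwise unused
  match PySem.List.pyGet? grid 0 with
  | none => none
  | some _ => horLoopA grid (PySem.List.pyRange 1 (grid.length : Int) 1)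

-- ===== PORT B =====
-- the 'while lo >= 0 and hi < m and grid[lo] == grid[hi]: lo, hi = lo-1, hi+1' loop of B;
-- fuel bounds the iteration count (hi strictly increases towards m), never reached before exit
def expandB (grid : List String) (m : Int) : Nat → Int → Int → Int × Int
  | 0, lo, hi => (lo, hi)
  | fuel + 1, lo, hi =>
    if 0 ≤ lo ∧ hi < m ∧ PySem.List.pyGet? grid lo = PySem.List.pyGet? grid hi
    then expandB grid m fuel (lo - 1) (hi + 1)
    else (lo, hi)

-- the 'for r in range(1, m): … if lo < 0 or hi >= m: return r / return None' loop of B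
def horLoopB (grid : List String) (m : Int) : List Int → Option Int
  | [] => none
  | r :: rest =>
    let p := expandB grid m grid.length (r - 1) r
    if p.1 < 0 ∨ m ≤ p.2 then some r else horLoopB grid m rest

def hor_mirror_alt (grid : List String) : Option Int :=
  horLoopB grid (grid.length : Int) (PySem.List.pyRange 1 (grid.length : Int) 1)

-- ===== PRECONDITION & SPEC =====
-- Pre_ excludes only the empty grid, on which A raises IndexError at 'len(grid[0])'.
def Pre_hor_mirror (grid : List String) : Prop := grid ≠ []
instance (grid : List String) : Decidable (Pre_hor_mirror grid) := by unfold Pre_hor_mirror; infer_instance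

def pvWitness_hor_mirror : List String := ["#.", "#.", ".."]

def Spec_hor_mirror (grid : List String) (out : Option Int) : Prop := out = hor_mirror_alt grid
instance (grid : List String) (out : Option Int) : Decidable (Spec_hor_mirror grid out) := by unfold Spec_hor_mirror; infer_instance

-- ===== CLAIM (what is proved, stated in full; the proofs are below) =====
def Claim_equal_hor_mirror : Prop := ∀ (grid : List String), Dom_hor_mirror grid → Pre_hor_mirror grid → Spec_hor_mirror grid (hor_mirror grid)

-- ===== LEMMAS AND PROOFS =====

-- grid[a::-1] for 0 ≤ a < len is the reversed (a+1)-prefix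
lemma slice?_rev_prefix (xs : List String) (a : Nat) (ha : a < xs.length) :
    PySem.List.slice? xs (some (a : Int)) none (-1) = some ((xs.take (a + 1)).reverse) := by
  unfold PySem.List.slice? PySem.List.sliceIndices
  have hstep : ¬ ((-1 : Int) = 0) := by decide
  rw [if_neg hstep]
  have h1 : ¬ ((a : Int) < 0) := by omega
  have h2 : min (a : Int) ((xs.length : Int) - 1) = (a : Int) := by omega
  have h3 : ((-1 : Int) < (a : Int)) := by omega
  simp only [show ((-1:Int) < 0) = True by simp, if_true, if_neg h1, h2, if_pos h3,
    show ¬ ((0:Int) < -1) by decide, if_false]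
  have hc : (((a : Int) - -1 + - -1 - 1) / - -1).toNat = a + 1 := by
    norm_num
  rw [hc, List.filterMap_congr (g := fun k => (some ∘ fun k => xs.getD (a - k) "") k)]
  · rw [List.filterMap_eq_map]
    congr 1
    apply List.ext_getElem
    · simp; omega
    · intro i hi1 hi2
      simp only [List.getElem_map, List.getElem_range, List.getElem_reverse, List.getElem_take]
      rw [List.getD_eq_getElem]
      · congr 1
        simp at hi1 ⊢
        omega
      · simp at hi1; omega
  · intro k hk
    simp only [List.mem_range] at hk
    have ht : ((a : Int) + -1 * (k : Int)).toNat = a - k := by omega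
    rw [ht]
    simp only [Function.comp]
    rw [List.getElem?_eq_getElem (by omega), List.getD_eq_getElem _ _ (by omega)]

-- A's condition at r, characterised pointwise (t = r.toNat)
lemma condA_iff (grid : List String) (r : Int) (h1 : 1 ≤ r) (h2 : r < (grid.length : Int)) :
    (let sec1 := (PySem.List.slice? grid (some (r - 1)) none (-1)).getD []
     let sec2 := PySem.List.slice grid (some r) none
     let valid : Int := min (sec1.length : Int) (sec2.length : Int)
     PySem.List.slice sec1 none (some valid) = PySem.List.slice sec2 none (some valid)) ↔
    (∀ k : Nat, k < min r.toNat (grid.length - r.toNat) →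
      grid.getD (r.toNat - 1 - k) "" = grid.getD (r.toNat + k) "") := by
  set t := r.toNat with ht
  have htlen : t < grid.length := by omega
  have ht1 : 1 ≤ t := by omega
  have hr1 : r - 1 = ((t - 1 : Nat) : Int) := by omega
  have hsec1 : ((PySem.List.slice? grid (some (r - 1)) none (-1)).getD []) = (grid.take t).reverse := by
    rw [hr1, slice?_rev_prefix grid (t-1) (by omega)]
    rw [show t - 1 + 1 = t by omega]
    simp only [Option.getD_some]
  have hsec2 : PySem.List.slice grid (some r) none = grid.drop t := by
    rw [PySem.List.slice_from grid (by omega)]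
  set v := min t (grid.length - t) with hv
  simp only [hsec1, hsec2]
  have hlen1 : ((grid.take t).reverse).length = t := by simp; omega
  have hlen2 : (grid.drop t).length = grid.length - t := by simp
  have hvalid : (min (((grid.take t).reverse).length : Int) ((grid.drop t).length : Int)) = (v : Int) := by
    rw [hlen1, hlen2]; omega
  rw [hvalid, PySem.List.slice_to _ (by omega), PySem.List.slice_to _ (by omega)]
  rw [show ((v : Int)).toNat = v by omega]
  have hL1 : ((grid.take t).reverse.take v).length = v := by simp; omega
  have hL2 : (((grid.drop t).take v)).length = v := by simp; omega
  constructor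
  · intro heq k hk
    have := congrArg (fun l => l.getD k "") heq
    simp only [List.getD_eq_getElem?_getD] at this
    rw [List.getElem?_eq_getElem (by omega), List.getElem?_eq_getElem (by omega)] at this
    simp only [Option.getD_some, List.getElem_take, List.getElem_reverse, List.getElem_drop,
      List.length_take] at this
    rw [List.getD_eq_getElem _ _ (by omega), List.getD_eq_getElem _ _ (by omega)]
    convert this using 2 <;> omega
  · intro h
    apply List.ext_getElem (by omega)
    intro i hi1 hi2
    simp only [List.getElem_take, List.getElem_reverse, List.getElem_drop,
      List.length_take, List.length_reverse]
    have := h i (by omega)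
    rw [List.getD_eq_getElem _ _ (by omega), List.getD_eq_getElem _ _ (by omega)] at this
    convert this using 2 <;> omega

-- B's expansion, characterised: it reaches a boundary iff every in-range pair matches
lemma expand_iff (grid : List String) (m : Int) :
    ∀ (fuel : Nat) (lo hi : Int), lo + 1 ≤ (fuel : Int) →
    (((expandB grid m fuel lo hi).1 < 0 ∨ m ≤ (expandB grid m fuel lo hi).2) ↔
      (∀ k : Nat, (k : Int) ≤ lo → hi + k < m →
        PySem.List.pyGet? grid (lo - k) = PySem.List.pyGet? grid (hi + k))) := by
  intro fuel
  induction fuel with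
  | zero =>
    intro lo hi hf
    simp only [expandB]
    constructor
    · intro _ k hk1 _
      exfalso
      have : (0:Int) ≤ (k:Int) := by positivity
      omega
    · intro _
      left
      omega
  | succ n ih =>
    intro lo hi hf
    by_cases hg : 0 ≤ lo ∧ hi < m ∧ PySem.List.pyGet? grid lo = PySem.List.pyGet? grid hi
    · rw [show expandB grid m (n+1) lo hi = expandB grid m n (lo-1) (hi+1) by
        rw [expandB]; exact if_pos hg]
      rw [ih (lo-1) (hi+1) (by omega)]
      constructor
      · intro h k hk1 hk2
        match k with
        | 0 => simpa using hg.2.2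
        | (j+1 : Nat) =>
          have := h j (by push_cast at hk1 ⊢; omega) (by push_cast at hk2 ⊢; omega)
          convert this using 2 <;> push_cast <;> ring
      · intro h k hk1 hk2
        have := h (k+1) (by push_cast; omega) (by push_cast at hk2 ⊢; omega)
        convert this using 2 <;> push_cast <;> ring
    · rw [show expandB grid m (n+1) lo hi = (lo, hi) by rw [expandB]; exact if_neg hg]
      simp only
      push Not at hg
      constructor
      · intro h k hk1 hk2
        exfalso
        rcases h with h | h
        · omega
        · have : (k:Int) ≥ 0 := by positivity
          omega
      · intro h
        by_cases hlo : 0 ≤ lo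
        · by_cases hhi : hi < m
          · exact absurd (by simpa using h 0 (by omega) (by omega)) (hg hlo hhi)
          · right; omega
        · left; omega

-- B's condition at r, characterised pointwise, matching condA_iff's right-hand side
lemma condB_iff (grid : List String) (r : Int) (h1 : 1 ≤ r) (h2 : r < (grid.length : Int)) :
    ((expandB grid ((grid.length : Int)) grid.length (r - 1) r).1 < 0 ∨
      (grid.length : Int) ≤ (expandB grid ((grid.length : Int)) grid.length (r - 1) r).2) ↔
    (∀ k : Nat, k < min r.toNat (grid.length - r.toNat) →
      grid.getD (r.toNat - 1 - k) "" = grid.getD (r.toNat + k) "") := by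
  rw [expand_iff grid ((grid.length : Int)) grid.length (r-1) r (by omega)]
  set t := r.toNat with ht
  constructor
  · intro h k hk
    have hk1 : t - 1 - k < grid.length := by omega
    have hk2 : t + k < grid.length := by omega
    have := h k (by omega) (by omega)
    rw [show r - 1 - (k:Int) = ((t - 1 - k : Nat) : Int) by omega,
        show r + (k:Int) = ((t + k : Nat) : Int) by omega] at this
    rw [PySem.List.pyGet?_natCast, PySem.List.pyGet?_natCast] at this
    rw [List.getElem?_eq_getElem hk1, List.getElem?_eq_getElem hk2] at this
    rw [List.getD_eq_getElem _ _ hk1, List.getD_eq_getElem _ _ hk2]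
    exact Option.some.inj this
  · intro h k hk1 hk2
    have hb1 : t - 1 - k < grid.length := by omega
    have hb2 : t + k < grid.length := by omega
    have := h k (by omega)
    rw [List.getD_eq_getElem _ _ hb1, List.getD_eq_getElem _ _ hb2] at this
    rw [show r - 1 - (k:Int) = ((t - 1 - k : Nat) : Int) by omega,
        show r + (k:Int) = ((t + k : Nat) : Int) by omega]
    rw [PySem.List.pyGet?_natCast, PySem.List.pyGet?_natCast]
    rw [List.getElem?_eq_getElem hb1, List.getElem?_eq_getElem hb2, this]

lemma loops_eq (grid : List String) :
    ∀ rs : List Int, (∀ r ∈ rs, 1 ≤ r ∧ r < (grid.length : Int)) →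
    horLoopA grid rs = horLoopB grid ((grid.length : Int)) rs := by
  intro rs
  induction rs with
  | nil => intro _; rfl
  | cons r rest ih =>
    intro hmem
    obtain ⟨h1, h2⟩ := hmem r (List.mem_cons_self)
    have hAB := (condA_iff grid r h1 h2).trans (condB_iff grid r h1 h2).symm
    rw [horLoopA, horLoopB]
    simp only at hAB ⊢
    split_ifs with hA hB hB
    · rfl
    · exact absurd (hAB.mp hA) hB
    · exact absurd (hAB.mpr hB) hA
    · exact ih (fun x hx => hmem x (List.mem_cons_of_mem _ hx))

-- ===== VERDICT (by name: the statement is the Claim_ definition above) =====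
theorem hor_mirror_spec : Claim_equal_hor_mirror := by
  intro grid _ hpre
  unfold Spec_hor_mirror hor_mirror hor_mirror_alt
  have hne : grid ≠ [] := hpre
  obtain ⟨x, xs, rfl⟩ := List.exists_cons_of_ne_nil hne
  have h0 : PySem.List.pyGet? (x :: xs) 0 = some x := by
    simp [PySem.List.pyGet?, PySem.List.pyIdx?]
  rw [h0]
  exact loops_eq (x :: xs) _ (fun r hr => (PySem.List.mem_pyRange_one.mp hr))
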